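-- pv_equiv track=rewrite | github.com/okiratli/Citation-Cross-Checker | src/citation_cross_checker/parsers.py | _is_non_author_pattern
-- ===== SOURCE A (Python) =====
-- def _is_non_author_pattern(text: str) -> bool:
--     """
--     Check if text matches non-author patterns that shouldn't be parsed as citations.
--     Examples: "Hypothesis 3", "Table 1", "Figure 2", "November 2002", "Report 2024"
--     """
--     text_lower = text.lower().strip()
--
--     # List of common non-author words
--     non_author_words = [
--         # Document elements
--         'hypothesis', 'table', 'figure', 'appendix', 'section',
--         'chapter', 'equation', 'model', 'result', 'study',
--         'example', 'case', 'scenario', 'version', 'step',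
--         # Months
--         'january', 'february', 'march', 'april', 'may', 'june',
--         'july', 'august', 'september', 'october', 'november', 'december',
--         # Common words that appear before years
--         'around', 'circa', 'before', 'after', 'since', 'until',
--         'between', 'from', 'during', 'report', 'year', 'period',
--         'spring', 'summer', 'fall', 'autumn', 'winter', 'quarter',
--         # Other false positives
--         'vol', 'volume', 'issue', 'page', 'number', 'article'
--     ]
--
--     # Check if the text starts with any non-author word
--     for word in non_author_words:
--         if text_lower.startswith(word):
--             return True
--
--     return False
-- ===== SOURCE B (Python) =====
-- # Keywords bucketed by length: one space-separated string per distinct length.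
-- _BY_LEN = {
--     3: "may vol",
--     4: "case step june july from year fall page",
--     5: "table model study march april circa after since until issue",
--     6: "figure result august around before during report period spring summer autumn winter volume number",
--     7: "section chapter example version january october between quarter article",
--     8: "appendix equation scenario february november december",
--     9: "september",
--     10: "hypothesis",
-- }
--
--
-- def _is_non_author_pattern(text: str) -> bool:
--     """Instead of scanning all 51 keywords with startswith, take the length-n
--     prefix slice of the text for each of the 8 distinct keyword lengths and
--     look it up in that length's bucket."""
--     s = text.lower().strip()
--     return any(s[:n] in ws.split() for n, ws in _BY_LEN.items())
-- ===== Notes on version B (the rewrite author's own statement) =====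
-- stated objective: alternative
-- what changed: A scans all 51 keywords testing text_lower.startswith(word); B buckets the keywords by length (one space-separated string per distinct length) and, for each of the 8 lengths n, looks up the length-n prefix slice of the text in that bucket.
import Mathlib
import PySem

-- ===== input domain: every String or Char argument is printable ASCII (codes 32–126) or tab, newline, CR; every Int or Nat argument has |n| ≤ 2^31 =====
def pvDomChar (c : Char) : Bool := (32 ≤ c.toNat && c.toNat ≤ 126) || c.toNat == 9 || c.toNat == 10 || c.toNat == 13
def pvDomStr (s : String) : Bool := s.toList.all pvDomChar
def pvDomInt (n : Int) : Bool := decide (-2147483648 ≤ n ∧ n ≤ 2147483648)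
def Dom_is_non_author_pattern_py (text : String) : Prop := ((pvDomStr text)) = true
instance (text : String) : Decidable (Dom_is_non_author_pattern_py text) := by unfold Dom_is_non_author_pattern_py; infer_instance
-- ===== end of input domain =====

-- ===== PORT A =====
-- One honest line: B replaces A's 51 startswith tests by a bucket-by-length lookup of
-- the length-n prefix slice, one probe per distinct keyword length (objective: alternative).
def pvWordsA : List String :=
  ["hypothesis", "table", "figure", "appendix", "section",
   "chapter", "equation", "model", "result", "study",
   "example", "case", "scenario", "version", "step",
   "january", "february", "march", "april", "may", "june",
   "july", "august", "september", "october", "november", "december",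
   "around", "circa", "before", "after", "since", "until",
   "between", "from", "during", "report", "year", "period",
   "spring", "summer", "fall", "autumn", "winter", "quarter",
   "vol", "volume", "issue", "page", "number", "article"]

-- the 'for word in non_author_words: if text_lower.startswith(word): return True' loop
def pvLoopA (s : String) : List String → Bool
  | [] => false
  | w :: ws => if PySem.Str.startswith s w then true else pvLoopA s ws

def is_non_author_pattern_py (text : String) : Bool :=
  let text_lower := PySem.Str.strip (PySem.Str.lower text)
  pvLoopA text_lower pvWordsA

-- ===== PORT B =====
-- the dict literal _BY_LEN: one space-separated bucket string per distinct keyword length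
def pvByLenB : List (Int × String) :=
  [(3, "may vol"),
   (4, "case step june july from year fall page"),
   (5, "table model study march april circa after since until issue"),
   (6, "figure result august around before during report period spring summer autumn winter volume number"),
   (7, "section chapter example version january october between quarter article"),
   (8, "appendix equation scenario february november december"),
   (9, "september"),
   (10, "hypothesis")]

-- the 'any(s[:n] in ws.split() for n, ws in _BY_LEN.items())' generator
def pvAnyB (s : String) : List (Int × String) → Bool
  | [] => false
  | (n, ws) :: rest =>
    if (PySem.Str.split₀ ws).contains (PySem.Str.slice s none (some n)) then true
    else pvAnyB s rest

def is_non_author_pattern_py_alt (text : String) : Bool :=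
  let s := PySem.Str.strip (PySem.Str.lower text)
  pvAnyB s pvByLenB

-- ===== PRECONDITION & SPEC =====
def Spec_is_non_author_pattern_py (text : String) (out : Bool) : Prop := out = is_non_author_pattern_py_alt text
instance (text : String) (out : Bool) : Decidable (Spec_is_non_author_pattern_py text out) := by unfold Spec_is_non_author_pattern_py; infer_instance

-- ===== CLAIM (what is proved, stated in full; the proofs are below) =====
def Claim_equal_is_non_author_pattern_py : Prop := ∀ (text : String), Dom_is_non_author_pattern_py text → Spec_is_non_author_pattern_py text (is_non_author_pattern_py text)

-- ===== LEMMAS AND PROOFS =====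
theorem pvLoopA_iff (s : String) (ws : List String) :
    pvLoopA s ws = true ↔ ∃ w ∈ ws, w.toList <+: s.toList := by
  induction ws with
  | nil => simp [pvLoopA]
  | cons w ws ih =>
    simp only [pvLoopA]
    by_cases h : PySem.Str.startswith s w = true
    · have hp : w.toList <+: s.toList :=
        (PySem.Chars.startswith_iff s.toList w.toList).mp (by simpa using h)
      rw [if_pos h]
      exact ⟨fun _ => ⟨w, List.mem_cons_self, hp⟩, fun _ => rfl⟩
    · have h' : ¬ w.toList <+: s.toList := fun hp => h (by
        simpa using (PySem.Chars.startswith_iff s.toList w.toList).mpr hp)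
      rw [if_neg h, ih]
      constructor
      · rintro ⟨w', hw', hp⟩; exact ⟨w', List.mem_cons_of_mem _ hw', hp⟩
      · rintro ⟨w', hw', hp⟩
        rcases List.mem_cons.mp hw' with rfl | hw'
        · exact absurd hp h'
        · exact ⟨w', hw', hp⟩

theorem pvAnyB_iff (s : String) (ps : List (Int × String)) :
    pvAnyB s ps = true ↔
      ∃ p ∈ ps, PySem.Str.slice s none (some p.1) ∈ PySem.Str.split₀ p.2 := by
  induction ps with
  | nil => simp [pvAnyB]
  | cons p ps ih =>
    obtain ⟨n, ws⟩ := p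
    simp only [pvAnyB]
    by_cases h : (PySem.Str.split₀ ws).contains (PySem.Str.slice s none (some n)) = true
    · have hm : PySem.Str.slice s none (some n) ∈ PySem.Str.split₀ ws :=
        List.contains_iff_mem.mp h
      rw [if_pos h]
      exact ⟨fun _ => ⟨(n, ws), List.mem_cons_self, hm⟩, fun _ => rfl⟩
    · have hnm : PySem.Str.slice s none (some n) ∉ PySem.Str.split₀ ws := fun hm =>
        h (List.contains_iff_mem.mpr hm)
      rw [if_neg h, ih]
      constructor
      · rintro ⟨p', hp', hm⟩; exact ⟨p', List.mem_cons_of_mem _ hp', hm⟩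
      · rintro ⟨p', hp', hm⟩
        rcases List.mem_cons.mp hp' with rfl | hp'
        · exact absurd hm hnm
        · exact ⟨p', hp', hm⟩

-- every bucket entry is one of A's keywords, of exactly the bucket's length
set_option maxRecDepth 20000 in
theorem pvBucketSound : ∀ p ∈ pvByLenB, ∀ x ∈ PySem.Str.split₀ p.2,
    x ∈ pvWordsA ∧ (x.toList.length : Int) = p.1 := by decide

-- every keyword of A appears in the bucket keyed by its length
set_option maxRecDepth 20000 in
theorem pvBucketComplete : ∀ w ∈ pvWordsA,
    ∃ p ∈ pvByLenB, w ∈ PySem.Str.split₀ p.2 ∧ p.1 = (w.toList.length : Int) := by decide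

theorem pvSlice_toList (s : String) (n : Int) (hn : 0 ≤ n) :
    (PySem.Str.slice s none (some n)).toList = s.toList.take n.toNat := by
  simp [PySem.List.slice_to _ hn]

-- ===== VERDICT (by name: the statement is the Claim_ definition above) =====

theorem is_non_author_pattern_py_spec : Claim_equal_is_non_author_pattern_py := by
  intro text _
  unfold Spec_is_non_author_pattern_py
  unfold is_non_author_pattern_py is_non_author_pattern_py_alt
  set s := PySem.Str.strip (PySem.Str.lower text) with hs
  rw [Bool.eq_iff_iff, pvLoopA_iff, pvAnyB_iff]
  constructor
  · rintro ⟨w, hw, hp⟩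
    obtain ⟨p, hpmem, hwmem, hlen⟩ := pvBucketComplete w hw
    refine ⟨p, hpmem, ?_⟩
    have hteq : (PySem.Str.slice s none (some p.1)).toList = w.toList := by
      rw [pvSlice_toList s _ (by rw [hlen]; positivity), hlen, Int.toNat_natCast,
        ← List.prefix_iff_eq_take.mp hp]
    have : PySem.Str.slice s none (some p.1) = w := by
      have := congrArg String.ofList hteq
      rwa [String.ofList_toList, String.ofList_toList] at this
    rw [this]; exact hwmem
  · rintro ⟨p, hpmem, hm⟩
    obtain ⟨hwA, hlen⟩ := pvBucketSound p hpmem _ hm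
    refine ⟨_, hwA, ?_⟩
    rw [pvSlice_toList s p.1 (by rw [← hlen]; positivity)]
    exact List.take_prefix _ _
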